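-- pv_equiv track=rewrite | github.com/MichalMachura/nn_executor | src/nn_executor/prune.py | __determine_reindexation_maps
-- ===== SOURCE A (Python) =====
-- def __determine_reindexation_maps(nodes_inputs_masks, nodes_outputs_masks, nodes_modules):
--     nodes_indices_map = []
--     nodes_inputs_map = []
--     nodes_outputs_map = []
--     node_cntr = 0
--     for node_module, in_mask, out_mask in zip(nodes_modules,
--                                               nodes_inputs_masks,
--                                               nodes_outputs_masks):
--         # node removed
--         if node_module is None:
--             nodes_indices_map.append(None)
--             nodes_inputs_map.append(None)
--             nodes_outputs_map.append(None)
--             continue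
--
--         # node appears
--         # new index of module
--         nodes_indices_map.append(node_cntr)
--         node_cntr += 1
--
--         # map inputs
--         node_in_mask_map = []
--         in_cntr = 0
--         for v in in_mask:
--             node_in_mask_map.append(in_cntr if v else None)
--             in_cntr = in_cntr+1 if v else in_cntr
--
--         # map outputs
--         node_out_mask_map = []
--         out_cntr = 0
--         for v in out_mask:
--             node_out_mask_map.append(out_cntr if v else None)
--             out_cntr = out_cntr+1 if v else out_cntr
--
--         # append maps
--         nodes_inputs_map.append(node_in_mask_map)
--         nodes_outputs_map.append(node_out_mask_map)
--
--     return nodes_indices_map,nodes_inputs_map,nodes_outputs_map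
-- ===== SOURCE B (Python) =====
-- def __determine_reindexation_maps(nodes_inputs_masks, nodes_outputs_masks, nodes_modules):
--     # Gather/scatter strategy: collect the surviving positions, then write their
--     # new indices (their rank in the survivor list) into a preallocated None array.
--     n = min(len(nodes_modules), len(nodes_inputs_masks), len(nodes_outputs_masks))
--
--     def scatter(flags):
--         out = [None] * len(flags)
--         survivors = [i for i, v in enumerate(flags) if v]
--         for new, old in enumerate(survivors):
--             out[old] = new
--         return out
--
--     alive = [m is not None for m in nodes_modules[:n]]
--     nodes_indices_map = scatter(alive)
--     nodes_inputs_map = [scatter(m) if a else None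
--                         for a, m in zip(alive, nodes_inputs_masks[:n])]
--     nodes_outputs_map = [scatter(m) if a else None
--                          for a, m in zip(alive, nodes_outputs_masks[:n])]
--     return nodes_indices_map, nodes_inputs_map, nodes_outputs_map
-- ===== Notes on version B (the rewrite author's own statement) =====
-- stated objective: alternative
-- what changed: Replaces A's inline running counters with a gather/scatter construction: collect the list of surviving positions, then write each survivor's rank into a preallocated None array; no counter is incremented along any mask.
import Mathlib
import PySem

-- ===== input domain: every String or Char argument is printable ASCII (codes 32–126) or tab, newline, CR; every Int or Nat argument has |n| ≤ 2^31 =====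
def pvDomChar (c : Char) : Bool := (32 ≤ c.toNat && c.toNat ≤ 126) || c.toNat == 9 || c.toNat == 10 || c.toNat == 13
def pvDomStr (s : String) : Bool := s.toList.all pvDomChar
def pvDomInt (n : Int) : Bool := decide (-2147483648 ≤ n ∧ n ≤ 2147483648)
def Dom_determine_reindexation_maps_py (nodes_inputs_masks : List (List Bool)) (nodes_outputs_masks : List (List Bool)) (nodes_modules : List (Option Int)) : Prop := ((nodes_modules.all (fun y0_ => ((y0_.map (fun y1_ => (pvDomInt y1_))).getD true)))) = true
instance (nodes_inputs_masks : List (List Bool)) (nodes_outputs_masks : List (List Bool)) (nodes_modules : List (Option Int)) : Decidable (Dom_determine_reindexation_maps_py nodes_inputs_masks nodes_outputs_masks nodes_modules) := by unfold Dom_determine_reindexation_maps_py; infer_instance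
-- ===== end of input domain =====

-- B replaces A's running counters by a gather/scatter pass: it collects the surviving
-- positions and writes each one's rank into a preallocated None array; same cost,
-- genuinely different construction (no counter is ever incremented along the mask).

-- ===== PORT A =====
-- inner loop of A: running counter over a mask
def pvMaskScan (mask : List Bool) (cntr : Int) : List (Option Int) :=
  match mask with
  | [] => []
  | v :: vs => (if v then some cntr else none) :: pvMaskScan vs (if v then cntr + 1 else cntr)

-- outer loop of A over zip(nodes_modules, nodes_inputs_masks, nodes_outputs_masks), carrying node_cntr
def pvGoA (l : List (Option Int × List Bool × List Bool)) (node_cntr : Int) :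
    List (Option Int) × List (Option (List (Option Int))) × List (Option (List (Option Int))) :=
  match l with
  | [] => ([], [], [])
  | (m, in_mask, out_mask) :: rest =>
    match m with
    | none =>
      let (a, b, c) := pvGoA rest node_cntr
      (none :: a, none :: b, none :: c)
    | some _ =>
      let (a, b, c) := pvGoA rest (node_cntr + 1)
      (some node_cntr :: a, some (pvMaskScan in_mask 0) :: b, some (pvMaskScan out_mask 0) :: c)

def determine_reindexation_maps_py (nodes_inputs_masks : List (List Bool)) (nodes_outputs_masks : List (List Bool)) (nodes_modules : List (Option Int)) : List (Option Int) × List (Option (List (Option Int))) × List (Option (List (Option Int))) :=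
  pvGoA (nodes_modules.zip (nodes_inputs_masks.zip nodes_outputs_masks)) 0

-- ===== PORT B =====
-- B's scatter: survivors = [i for i, v in enumerate(flags) if v];
-- out = [None]*len(flags); for new, old in enumerate(survivors): out[old] = new
def pvScatter (flags : List Bool) : List (Option Int) :=
  let survivors := flags.zipIdx.filterMap (fun p => if p.1 then some p.2 else none)
  survivors.zipIdx.foldl (fun acc q => acc.set q.1 (some (q.2 : Int)))
    (List.replicate flags.length (none : Option Int))

def determine_reindexation_maps_py_alt (nodes_inputs_masks : List (List Bool)) (nodes_outputs_masks : List (List Bool)) (nodes_modules : List (Option Int)) : List (Option Int) × List (Option (List (Option Int))) × List (Option (List (Option Int))) :=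
  let n := min (min nodes_modules.length nodes_inputs_masks.length) nodes_outputs_masks.length
  let alive := (nodes_modules.take n).map (fun m => m.isSome)
  let indices := pvScatter alive
  let inputs := (alive.zip (nodes_inputs_masks.take n)).map fun p => if p.1 then some (pvScatter p.2) else none
  let outputs := (alive.zip (nodes_outputs_masks.take n)).map fun p => if p.1 then some (pvScatter p.2) else none
  (indices, inputs, outputs)

-- ===== PRECONDITION & SPEC =====
def Spec_determine_reindexation_maps_py (nodes_inputs_masks : List (List Bool)) (nodes_outputs_masks : List (List Bool)) (nodes_modules : List (Option Int)) (out : List (Option Int) × List (Option (List (Option Int))) × List (Option (List (Option Int)))) : Prop := out = determine_reindexation_maps_py_alt nodes_inputs_masks nodes_outputs_masks nodes_modules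
instance (nodes_inputs_masks : List (List Bool)) (nodes_outputs_masks : List (List Bool)) (nodes_modules : List (Option Int)) (out : List (Option Int) × List (Option (List (Option Int))) × List (Option (List (Option Int)))) : Decidable (Spec_determine_reindexation_maps_py nodes_inputs_masks nodes_outputs_masks nodes_modules out) := by unfold Spec_determine_reindexation_maps_py; infer_instance

-- ===== CLAIM (what is proved, stated in full; the proofs are below) =====
def Claim_equal_determine_reindexation_maps_py : Prop := ∀ (nodes_inputs_masks : List (List Bool)) (nodes_outputs_masks : List (List Bool)) (nodes_modules : List (Option Int)), Dom_determine_reindexation_maps_py nodes_inputs_masks nodes_outputs_masks nodes_modules → Spec_determine_reindexation_maps_py nodes_inputs_masks nodes_outputs_masks nodes_modules (determine_reindexation_maps_py nodes_inputs_masks nodes_outputs_masks nodes_modules)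

-- ===== LEMMAS AND PROOFS =====

-- the survivor-position list of B, written recursively
def pvSurv : List Bool → List Nat
  | [] => []
  | v :: vs => if v then 0 :: (pvSurv vs).map (· + 1) else (pvSurv vs).map (· + 1)

theorem pvSurv_eq (flags : List Bool) :
    flags.zipIdx.filterMap (fun p => if p.1 then some p.2 else none) = pvSurv flags := by
  induction flags with
  | nil => simp [pvSurv]
  | cons v vs ih =>
    rw [List.zipIdx_cons, List.filterMap_cons, show (1 : Nat) = 0 + 1 from rfl,
        List.zipIdx_succ, List.filterMap_map]
    cases v <;>
      simp [pvSurv, ← ih, List.map_filterMap, Function.comp, apply_ite (Option.map (· + 1))]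

-- scattering pairs whose targets are all shifted by one writes past the head
theorem pvScatter_shift (pairs : List (Nat × Nat)) : ∀ (x : Option Int) (init : List (Option Int)),
    (pairs.map (fun q => (q.1 + 1, q.2))).foldl (fun acc q => acc.set q.1 (some (q.2 : Int))) (x :: init)
      = x :: pairs.foldl (fun acc q => acc.set q.1 (some (q.2 : Int))) init := by
  induction pairs with
  | nil => intro x init; simp
  | cons q rest ih => intro x init; simp [List.set_cons_succ, ih]

theorem pvScatter_main (flags : List Bool) : ∀ (j : Nat),
    ((pvSurv flags).zipIdx j).foldl (fun acc q => acc.set q.1 (some (q.2 : Int)))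
      (List.replicate flags.length (none : Option Int)) = pvMaskScan flags (j : Int) := by
  induction flags with
  | nil => intro j; simp [pvSurv, pvMaskScan]
  | cons v vs ih =>
    intro j
    cases v with
    | false =>
      simp only [pvSurv, reduceIte, Bool.false_eq_true, List.length_cons, List.replicate_succ]
      rw [List.zipIdx_map, show Prod.map (· + 1 : Nat → Nat) (id : Nat → Nat)
            = fun q : Nat × Nat => (q.1 + 1, q.2) from funext (fun q => rfl),
          pvScatter_shift, ih j]
      simp [pvMaskScan]
    | true =>
      simp only [pvSurv, reduceIte, List.length_cons, List.replicate_succ, List.zipIdx_cons,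
        List.foldl_cons, List.set_cons_zero]
      rw [List.zipIdx_map, show Prod.map (· + 1 : Nat → Nat) (id : Nat → Nat)
            = fun q : Nat × Nat => (q.1 + 1, q.2) from funext (fun q => rfl),
          pvScatter_shift, ih (j + 1)]
      simp [pvMaskScan]

theorem pvScatter_eq (flags : List Bool) : pvScatter flags = pvMaskScan flags 0 := by
  unfold pvScatter
  rw [pvSurv_eq]
  simpa using pvScatter_main flags 0

theorem pvGoA_eq (l : List (Option Int × List Bool × List Bool)) : ∀ (c : Int),
    pvGoA l c = (pvMaskScan (l.map fun t => t.1.isSome) c,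
                 l.map (fun t => if t.1.isSome then some (pvMaskScan t.2.1 0) else none),
                 l.map (fun t => if t.1.isSome then some (pvMaskScan t.2.2 0) else none)) := by
  induction l with
  | nil => intro c; simp [pvGoA, pvMaskScan]
  | cons t rest ih =>
    intro c
    obtain ⟨m, inm, outm⟩ := t
    cases m <;> simp [pvGoA, ih, pvMaskScan]

-- ===== VERDICT (by name: the statement is the Claim_ definition above) =====
theorem determine_reindexation_maps_py_spec : Claim_equal_determine_reindexation_maps_py := by
  intro ims oms mods _
  unfold Spec_determine_reindexation_maps_py determine_reindexation_maps_py determine_reindexation_maps_py_alt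
  dsimp only
  rw [pvGoA_eq]
  set n := min (min mods.length ims.length) oms.length with hn
  have halive : (mods.zip (ims.zip oms)).map (fun t => t.1.isSome)
      = (mods.take n).map (fun m => m.isSome) := by
    apply List.ext_getElem
    · simp [List.length_zip]; omega
    · intro i h1 h2; simp
  refine Prod.ext ?_ (Prod.ext ?_ ?_)
  · rw [pvScatter_eq, ← halive]
  · apply List.ext_getElem
    · simp [List.length_zip]; omega
    · intro i h1 h2
      have hi : i < n := by simp [List.length_zip] at h1; omega
      simp [List.getElem_zip, pvScatter_eq]
  · apply List.ext_getElem
    · simp [List.length_zip]; omega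
    · intro i h1 h2
      have hi : i < n := by simp [List.length_zip] at h1; omega
      simp [List.getElem_zip, pvScatter_eq]
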